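-- pv_equiv track=rewrite | github.com/whglamrock/leetcode_series | leetcode1245 Tree Diameter.py | findLongestAnd2ndLongestPaths
-- ===== SOURCE A (Python) =====
-- from typing import List, Dict
--
-- def findLongestAnd2ndLongestPaths(depths: List[int]) -> List[int]:
--     longest = max(depths[0], depths[1])
--     secondLongest = min(depths[0], depths[1])
--     for i in range(2, len(depths)):
--         depth = depths[i]
--         # need to update both
--         if depth > longest:
--             secondLongest = longest
--             longest = depth
--         elif depth > secondLongest:
--             secondLongest = depth
--
--     return [longest, secondLongest]
-- ===== SOURCE B (Python) =====
-- def findLongestAnd2ndLongestPaths(depths):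
--     s = sorted(depths, reverse=True)
--     return [s[0], s[1]]
-- ===== Notes on version B (the rewrite author's own statement) =====
-- stated objective: simpler
-- what changed: Replaces the running longest/secondLongest single-pass scan with sorting the list in descending order and reading off the first two elements.
import Mathlib
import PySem

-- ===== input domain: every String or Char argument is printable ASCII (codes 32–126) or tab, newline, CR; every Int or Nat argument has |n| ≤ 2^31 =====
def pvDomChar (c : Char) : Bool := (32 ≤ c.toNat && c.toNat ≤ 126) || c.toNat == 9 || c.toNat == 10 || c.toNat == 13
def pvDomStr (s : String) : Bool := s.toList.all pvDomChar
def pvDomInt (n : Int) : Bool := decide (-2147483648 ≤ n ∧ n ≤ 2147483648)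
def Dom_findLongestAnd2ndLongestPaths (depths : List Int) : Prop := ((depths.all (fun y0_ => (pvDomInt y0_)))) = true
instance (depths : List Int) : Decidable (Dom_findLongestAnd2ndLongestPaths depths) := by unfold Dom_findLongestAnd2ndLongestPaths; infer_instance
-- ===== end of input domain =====

-- B replaces A's running longest/secondLongest scan by sorting descending and taking
-- the first two elements (objective: simpler). Both raise IndexError on lists of
-- length < 2; those inputs are excluded by Pre_.

-- ===== PORT A =====
-- one iteration of A's loop body on the state (longest, secondLongest)
def pvStepA (p : Int × Int) (depth : Int) : Int × Int :=
  if depth > p.1 then (depth, p.1)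
  else if depth > p.2 then (p.1, depth)
  else p

-- 'for i in range(2, len(depths)): depth = depths[i]; …' visits exactly the
-- elements of depths.drop 2 in order — ported as a fold over that tail (exact).
def findLongestAnd2ndLongestPaths (depths : List Int) : List Int :=
  match depths with
  | d0 :: d1 :: rest =>
      let longest := max d0 d1
      let secondLongest := min d0 d1
      let p := rest.foldl pvStepA (longest, secondLongest)
      [p.1, p.2]
  | _ => []  -- Python: depths[0]/depths[1] raises IndexError; excluded by Pre_

-- ===== PORT B =====
def findLongestAnd2ndLongestPaths_alt (depths : List Int) : List Int :=
  let s := PySem.List.sorted depths (fun x => x) true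
  match PySem.List.pyGet? s 0, PySem.List.pyGet? s 1 with
  | some a, some b => [a, b]
  | _, _ => []  -- Python: s[0]/s[1] raises IndexError; excluded by Pre_

-- ===== PRECONDITION & SPEC =====
-- Pre_ excludes lists of length < 2, on which both Pythons raise IndexError.
def Pre_findLongestAnd2ndLongestPaths (depths : List Int) : Prop := 2 ≤ depths.length
instance (depths : List Int) : Decidable (Pre_findLongestAnd2ndLongestPaths depths) := by
  unfold Pre_findLongestAnd2ndLongestPaths; infer_instance

def pvWitness_findLongestAnd2ndLongestPaths : List Int := [3, 1, 2]

def Spec_findLongestAnd2ndLongestPaths (depths : List Int) (out : List Int) : Prop := out = findLongestAnd2ndLongestPaths_alt depths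
instance (depths : List Int) (out : List Int) : Decidable (Spec_findLongestAnd2ndLongestPaths depths out) := by unfold Spec_findLongestAnd2ndLongestPaths; infer_instance

-- ===== CLAIM (what is proved, stated in full; the proofs are below) =====
def Claim_equal_findLongestAnd2ndLongestPaths : Prop := ∀ (depths : List Int), Dom_findLongestAnd2ndLongestPaths depths → Pre_findLongestAnd2ndLongestPaths depths → Spec_findLongestAnd2ndLongestPaths depths (findLongestAnd2ndLongestPaths depths)

-- ===== LEMMAS AND PROOFS =====

-- sorted(xs, reverse=True) is the unique (as values) nonincreasing rearrangement of xs
theorem pv_sorted_rev_id_eq_of_perm_of_pairwise_ge (xs ys : List Int)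
    (hperm : ys.Perm xs) (hpw : ys.Pairwise (fun a b => b ≤ a)) :
    PySem.List.sorted xs (fun x => x) true = ys := by
  have h1 : ((PySem.List.sorted xs (fun x => x) true).reverse).Perm ys.reverse := by
    exact ((List.reverse_perm _).trans ((PySem.List.sorted_perm ..).trans
      (hperm.symm.trans (List.reverse_perm ys).symm)))
  have hpw1 : ((PySem.List.sorted xs (fun x => x) true).reverse).Pairwise
      (fun a b => (fun x : Int => x) a ≤ (fun x : Int => x) b) := by
    rw [List.pairwise_reverse]; exact PySem.List.sorted_pairwise_rev ..
  have hpw2 : (ys.reverse).Pairwise (fun a b => (fun x : Int => x) a ≤ (fun x : Int => x) b) := by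
    rw [List.pairwise_reverse]; exact hpw
  have := PySem.List.eq_of_perm_of_pairwise_le_of_injective (fun x : Int => x)
    (fun _ _ h => h) h1 hpw1 hpw2
  have := congrArg List.reverse this
  simpa using this


-- the running secondLongest never decreases along the fold
theorem pv_snd_mono (rest : List Int) : ∀ (L S : Int), S ≤ L →
    S ≤ (rest.foldl pvStepA (L, S)).2 := by
  induction rest with
  | nil => intro L S h; exact le_refl S |>.trans (le_refl _)
  | cons x rest ih =>
    intro L S hSL
    simp only [List.foldl_cons]
    by_cases h1 : x > L
    · rw [show pvStepA (L, S) x = (x, L) by simp [pvStepA, h1]]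
      exact hSL.trans (ih x L (le_of_lt h1))
    · by_cases h2 : x > S
      · rw [show pvStepA (L, S) x = (L, x) by simp [pvStepA, h1, h2]]
        exact (le_of_lt h2).trans (ih L x (by omega))
      · rw [show pvStepA (L, S) x = (L, S) by simp [pvStepA, h1, h2]]
        exact ih L S hSL

-- rotate the first three elements of a list
theorem pv_rot3 (a b c : Int) (l : List Int) : (a :: b :: c :: l).Perm (b :: c :: a :: l) :=
  (List.Perm.swap b a (c :: l)).trans ((List.Perm.swap c a l).cons b)

-- fold invariant: the two accumulators are the two largest values of everything seen;
-- t collects the dropped elements, all ≤ the running secondLongest.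
theorem pv_fold_inv (rest : List Int) : ∀ (L S : Int), S ≤ L →
    ∃ t : List Int,
      (L :: S :: rest).Perm ((rest.foldl pvStepA (L, S)).1 :: (rest.foldl pvStepA (L, S)).2 :: t) ∧
      (∀ x ∈ t, x ≤ (rest.foldl pvStepA (L, S)).2) ∧
      (rest.foldl pvStepA (L, S)).2 ≤ (rest.foldl pvStepA (L, S)).1 := by
  induction rest with
  | nil => intro L S hSL; exact ⟨[], List.Perm.refl _, by simp, hSL⟩
  | cons x rest ih =>
    intro L S hSL
    simp only [List.foldl_cons]
    by_cases h1 : x > L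
    · rw [show pvStepA (L, S) x = (x, L) by simp [pvStepA, h1]]
      obtain ⟨t, hm, ht, hle⟩ := ih x L (le_of_lt h1)
      refine ⟨S :: t, ?_, ?_, hle⟩
      · exact ((pv_rot3 L S x rest).trans (hm.cons S)).trans (pv_rot3 S _ _ t)
      · intro y hy
        rcases List.mem_cons.mp hy with rfl | hy
        · exact hSL.trans (pv_snd_mono rest x L (le_of_lt h1))
        · exact ht _ hy
    · by_cases h2 : x > S
      · rw [show pvStepA (L, S) x = (L, x) by simp [pvStepA, h1, h2]]
        obtain ⟨t, hm, ht, hle⟩ := ih L x (by omega)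
        refine ⟨S :: t, ?_, ?_, hle⟩
        · exact (((List.Perm.swap S L (x :: rest)).trans (hm.cons S))).trans (pv_rot3 S _ _ t)
        · intro y hy
          rcases List.mem_cons.mp hy with rfl | hy
          · exact (le_of_lt h2).trans (pv_snd_mono rest L _ (by omega))
          · exact ht _ hy
      · rw [show pvStepA (L, S) x = (L, S) by simp [pvStepA, h1, h2]]
        obtain ⟨t, hm, ht, hle⟩ := ih L S hSL
        refine ⟨x :: t, ?_, ?_, hle⟩
        · exact (((pv_rot3 x L S rest).symm).trans (hm.cons x)).trans (pv_rot3 x _ _ t)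
        · intro y hy
          rcases List.mem_cons.mp hy with rfl | hy
          · exact le_trans (by omega) (pv_snd_mono rest L S hSL)
          · exact ht _ hy

-- ===== VERDICT (by name: the statement is the Claim_ definition above) =====
theorem findLongestAnd2ndLongestPaths_spec : Claim_equal_findLongestAnd2ndLongestPaths := by
  intro depths _ hpre
  unfold Spec_findLongestAnd2ndLongestPaths
  match depths with
  | d0 :: d1 :: rest =>
    obtain ⟨t, hm, ht, hle⟩ := pv_fold_inv rest (max d0 d1) (min d0 d1) (min_le_max)
    set F := rest.foldl pvStepA (max d0 d1, min d0 d1) with hF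
    -- name the descending-sorted list: F.1 :: F.2 :: sorted t
    have hsorted : PySem.List.sorted (d0 :: d1 :: rest) (fun x => x) true
        = F.1 :: F.2 :: PySem.List.sorted t (fun x => x) true := by
      apply pv_sorted_rev_id_eq_of_perm_of_pairwise_ge
      · -- permutation: sorted t ~ t, and the multiset equality from the invariant
        have h1 : (F.1 :: F.2 :: PySem.List.sorted t (fun x => x) true).Perm (F.1 :: F.2 :: t) :=
          (PySem.List.sorted_perm ..).cons F.2 |>.cons F.1
        have h2 : (F.1 :: F.2 :: t).Perm (max d0 d1 :: min d0 d1 :: rest) := hm.symm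
        have h3 : (max d0 d1 :: min d0 d1 :: rest).Perm (d0 :: d1 :: rest) := by
          rcases le_total d0 d1 with h | h
          · simp [max_eq_right h, min_eq_left h]
            exact List.Perm.swap d0 d1 rest
          · simp [max_eq_left h, min_eq_right h]
        exact (h1.trans h2).trans h3
      · -- nonincreasing
        refine List.pairwise_cons.mpr ⟨?_, List.pairwise_cons.mpr ⟨?_, ?_⟩⟩
        · intro y hy
          rcases List.mem_cons.mp hy with rfl | hy
          · exact hle
          · exact le_trans (ht y ((PySem.List.mem_sorted ..).mp hy)) hle
        · intro y hy
          exact ht y ((PySem.List.mem_sorted ..).mp hy)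
        · exact PySem.List.sorted_pairwise_rev ..
    have hnn : ((0:Int) ≤ (t.length:Int) + 1) := by positivity
    simp [findLongestAnd2ndLongestPaths, findLongestAnd2ndLongestPaths_alt, hsorted, ← hF,
      PySem.List.pyGet?, PySem.List.pyIdx?, hnn]
  | [] => exact absurd hpre (by simp [Pre_findLongestAnd2ndLongestPaths])
  | [d0] => exact absurd hpre (by simp [Pre_findLongestAnd2ndLongestPaths])
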